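-- pv_equiv track=rewrite | github.com/annienar/Plan-Mensual-Comidas | core/domain/recipe/normalizers/text.py | denormalize
-- ===== SOURCE A (Python) =====
-- def denormalize(text: str) ->str:
--     """
--     Convert normalized text back to a more readable format.
--
--     Args:
--         text: Normalized text
--
--     Returns:
--         Denormalized text
--     """
--     if not text:
--         return ''
--     sentences = text.split('. ')
--     sentences = [s.capitalize() for s in sentences]
--     text = '. '.join(sentences)
--     lines = text.split('\n')
--     lines = [l.capitalize() for l in lines]
--     text = '\n'.join(lines)
--     return text
-- ===== SOURCE B (Python) =====
-- def denormalize(text: str) -> str: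
--     """Single pass: per-line capitalize; the sentence-level pass in A is fully
--     overridden by the per-line capitalize, so it is dropped."""
--     return '\n'.join(l.capitalize() for l in text.split('\n'))
-- ===== Notes on version B (the rewrite author's own statement) =====
-- stated objective: simpler
-- what changed: Dropped the entire sentence-level split/capitalize/join pass and the empty-string guard: a single per-line capitalize pass produces the same result because str.capitalize overwrites all letter case within each line.
import Mathlib
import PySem

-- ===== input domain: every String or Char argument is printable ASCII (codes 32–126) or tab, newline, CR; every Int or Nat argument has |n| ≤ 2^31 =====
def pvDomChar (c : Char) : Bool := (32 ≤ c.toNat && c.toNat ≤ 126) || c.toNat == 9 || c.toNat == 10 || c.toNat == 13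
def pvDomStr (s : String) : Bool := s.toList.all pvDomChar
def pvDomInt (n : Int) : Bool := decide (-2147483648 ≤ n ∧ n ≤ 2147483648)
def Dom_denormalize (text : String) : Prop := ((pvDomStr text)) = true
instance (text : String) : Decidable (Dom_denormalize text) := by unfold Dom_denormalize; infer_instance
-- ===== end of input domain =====

-- B drops A's sentence-level split('. ')/capitalize/join pass (it is fully overwritten by the
-- per-line capitalize) and the empty-string guard: one per-line pass, simpler.

-- ===== PORT A =====
-- Python str.capitalize for ASCII text: first char uppercased, rest lowercased
-- (hand-ported: PySem has no capitalize; exact on the ASCII domain, where title-case = upper-case).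
def pvCap : List Char → List Char
  | [] => []
  | c :: t => PySem.Chars.upperChar c :: PySem.Chars.lower t

def denormalize (text : String) : String :=
  if text.toList = [] then String.mk []
  else
    let sentences := PySem.Chars.splitOn text.toList ['.', ' ']
    let t1 := PySem.Chars.join ['.', ' '] (sentences.map pvCap)
    let lines := PySem.Chars.splitOn t1 ['\n']
    String.mk (PySem.Chars.join ['\n'] (lines.map pvCap))

-- ===== PORT B =====
def denormalize_alt (text : String) : String :=
  String.mk (PySem.Chars.join ['\n'] ((PySem.Chars.splitOn text.toList ['\n']).map pvCap))

-- ===== PRECONDITION & SPEC =====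
def Spec_denormalize (text : String) (out : String) : Prop := out = denormalize_alt text
instance (text : String) (out : String) : Decidable (Spec_denormalize text out) := by unfold Spec_denormalize; infer_instance

-- ===== CLAIM (what is proved, stated in full; the proofs are below) =====
def Claim_equal_denormalize : Prop := ∀ (text : String), Dom_denormalize text → Spec_denormalize text (denormalize text)

-- ===== LEMMAS AND PROOFS =====

-- Char basics
theorem pvChar_le_iff (c d : Char) : (c ≤ d) ↔ (c.toNat ≤ d.toNat) := by
  rw [Char.le_def, UInt32.le_iff_toNat_le]; rfl

theorem pvChar_eq_of_toNat (c d : Char) (h : c.toNat = d.toNat) : c = d :=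
  Char.ext (UInt32.toNat_inj.mp h)

theorem pvToNat_ofNat (n : Nat) (h : Nat.isValidChar n) : (Char.ofNat n).toNat = n := by
  simp [Char.ofNat, h, Char.toNat, Char.ofNatAux]

theorem pvCharLit_a : 'a'.toNat = 97 := rfl
theorem pvCharLit_z : 'z'.toNat = 122 := rfl
theorem pvCharLit_A : 'A'.toNat = 65 := rfl
theorem pvCharLit_Z : 'Z'.toNat = 90 := rfl
theorem pvCharLit_nl : '\n'.toNat = 10 := rfl

theorem pvLowerChar_upperChar (c : Char) :
    PySem.Chars.lowerChar (PySem.Chars.upperChar c) = PySem.Chars.lowerChar c := by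
  by_cases h : ('a' ≤ c ∧ c ≤ 'z')
  · have h' : 97 ≤ c.toNat ∧ c.toNat ≤ 122 := by
      rw [pvChar_le_iff, pvChar_le_iff, pvCharLit_a, pvCharLit_z] at h; exact h
    have ht : (Char.ofNat (c.toNat - 32)).toNat = c.toNat - 32 :=
      pvToNat_ofNat _ (Or.inl (by omega))
    have hu : PySem.Chars.upperChar c = Char.ofNat (c.toNat - 32) := by
      simp only [PySem.Chars.upperChar, PySem.Chars.islower, Bool.and_eq_true,
        decide_eq_true_eq, if_pos h]
    have hcond : ('A' ≤ Char.ofNat (c.toNat - 32) ∧ Char.ofNat (c.toNat - 32) ≤ 'Z') := by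
      constructor
      · rw [pvChar_le_iff, pvCharLit_A, ht]; omega
      · rw [pvChar_le_iff, pvCharLit_Z, ht]; omega
    have hl1 : PySem.Chars.lowerChar (Char.ofNat (c.toNat - 32)) =
        Char.ofNat ((Char.ofNat (c.toNat - 32)).toNat + 32) := by
      simp only [PySem.Chars.lowerChar, PySem.Chars.isupper, Bool.and_eq_true,
        decide_eq_true_eq, if_pos hcond]
    have hl2 : PySem.Chars.lowerChar c = c := by
      simp only [PySem.Chars.lowerChar, PySem.Chars.isupper, Bool.and_eq_true,
        decide_eq_true_eq]
      rw [if_neg (by rw [pvChar_le_iff, pvChar_le_iff, pvCharLit_A, pvCharLit_Z]; omega)]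
    rw [hu, hl1, hl2, ht]
    apply pvChar_eq_of_toNat
    rw [pvToNat_ofNat _ (Or.inl (by omega))]
    omega
  · have hu : PySem.Chars.upperChar c = c := by
      simp only [PySem.Chars.upperChar, PySem.Chars.islower, Bool.and_eq_true,
        decide_eq_true_eq, if_neg h]
    rw [hu]

theorem pvUpperChar_lowerChar (c : Char) :
    PySem.Chars.upperChar (PySem.Chars.lowerChar c) = PySem.Chars.upperChar c := by
  by_cases h : ('A' ≤ c ∧ c ≤ 'Z')
  · have h' : 65 ≤ c.toNat ∧ c.toNat ≤ 90 := by
      rw [pvChar_le_iff, pvChar_le_iff, pvCharLit_A, pvCharLit_Z] at h; exact h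
    have ht : (Char.ofNat (c.toNat + 32)).toNat = c.toNat + 32 :=
      pvToNat_ofNat _ (Or.inl (by omega))
    have hl : PySem.Chars.lowerChar c = Char.ofNat (c.toNat + 32) := by
      simp only [PySem.Chars.lowerChar, PySem.Chars.isupper, Bool.and_eq_true,
        decide_eq_true_eq, if_pos h]
    have hcond : ('a' ≤ Char.ofNat (c.toNat + 32) ∧ Char.ofNat (c.toNat + 32) ≤ 'z') := by
      constructor
      · rw [pvChar_le_iff, pvCharLit_a, ht]; omega
      · rw [pvChar_le_iff, pvCharLit_z, ht]; omega
    have hu1 : PySem.Chars.upperChar (Char.ofNat (c.toNat + 32)) =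
        Char.ofNat ((Char.ofNat (c.toNat + 32)).toNat - 32) := by
      simp only [PySem.Chars.upperChar, PySem.Chars.islower, Bool.and_eq_true,
        decide_eq_true_eq, if_pos hcond]
    have hu2 : PySem.Chars.upperChar c = c := by
      simp only [PySem.Chars.upperChar, PySem.Chars.islower, Bool.and_eq_true,
        decide_eq_true_eq]
      rw [if_neg (by rw [pvChar_le_iff, pvChar_le_iff, pvCharLit_a, pvCharLit_z]; omega)]
    rw [hl, hu1, hu2, ht]
    apply pvChar_eq_of_toNat
    rw [pvToNat_ofNat _ (Or.inl (by omega))]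
    omega
  · have hl : PySem.Chars.lowerChar c = c := by
      simp only [PySem.Chars.lowerChar, PySem.Chars.isupper, Bool.and_eq_true,
        decide_eq_true_eq, if_neg h]
    rw [hl]

theorem pvLowerChar_idem (c : Char) :
    PySem.Chars.lowerChar (PySem.Chars.lowerChar c) = PySem.Chars.lowerChar c := by
  by_cases h : ('A' ≤ c ∧ c ≤ 'Z')
  · have h' : 65 ≤ c.toNat ∧ c.toNat ≤ 90 := by
      rw [pvChar_le_iff, pvChar_le_iff, pvCharLit_A, pvCharLit_Z] at h; exact h
    have ht : (Char.ofNat (c.toNat + 32)).toNat = c.toNat + 32 :=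
      pvToNat_ofNat _ (Or.inl (by omega))
    have hl : PySem.Chars.lowerChar c = Char.ofNat (c.toNat + 32) := by
      simp only [PySem.Chars.lowerChar, PySem.Chars.isupper, Bool.and_eq_true,
        decide_eq_true_eq, if_pos h]
    rw [hl]
    simp only [PySem.Chars.lowerChar, PySem.Chars.isupper, Bool.and_eq_true,
      decide_eq_true_eq]
    rw [if_neg (by rw [pvChar_le_iff, pvChar_le_iff, pvCharLit_A, pvCharLit_Z, ht]; omega)]
  · have hl : PySem.Chars.lowerChar c = c := by
      simp only [PySem.Chars.lowerChar, PySem.Chars.isupper, Bool.and_eq_true,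
        decide_eq_true_eq, if_neg h]
    rw [hl, hl]

theorem pvUpperChar_congr {c d : Char}
    (h : PySem.Chars.lowerChar c = PySem.Chars.lowerChar d) :
    PySem.Chars.upperChar c = PySem.Chars.upperChar d := by
  rw [← pvUpperChar_lowerChar c, h, pvUpperChar_lowerChar]

theorem pvLowerChar_newline {c : Char} (h : PySem.Chars.lowerChar c = '\n') : c = '\n' := by
  by_cases hc : ('A' ≤ c ∧ c ≤ 'Z')
  · exfalso
    have h' : 65 ≤ c.toNat ∧ c.toNat ≤ 90 := by
      rw [pvChar_le_iff, pvChar_le_iff, pvCharLit_A, pvCharLit_Z] at hc; exact hc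
    have ht : (Char.ofNat (c.toNat + 32)).toNat = c.toNat + 32 :=
      pvToNat_ofNat _ (Or.inl (by omega))
    have hl : PySem.Chars.lowerChar c = Char.ofNat (c.toNat + 32) := by
      simp only [PySem.Chars.lowerChar, PySem.Chars.isupper, Bool.and_eq_true,
        decide_eq_true_eq, if_pos hc]
    rw [hl] at h
    have := congrArg Char.toNat h
    rw [ht, pvCharLit_nl] at this
    omega
  · have hl : PySem.Chars.lowerChar c = c := by
      simp only [PySem.Chars.lowerChar, PySem.Chars.isupper, Bool.and_eq_true,
        decide_eq_true_eq, if_neg hc]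
    rwa [hl] at h

-- intercalate helpers
theorem pvIntercalate_singleton (sep x : List Char) : sep.intercalate [x] = x := by
  simp [List.intercalate]

theorem pvIntercalate_cons (sep x : List Char) (l : List (List Char)) (h : l ≠ []) :
    sep.intercalate (x :: l) = x ++ sep ++ sep.intercalate l := by
  cases l with
  | nil => simp at h
  | cons y t => simp [List.intercalate, List.intersperse]

theorem pvMap_intercalate (f : Char → Char) (sep : List Char) :
    ∀ l : List (List Char), (sep.intercalate l).map f = (sep.map f).intercalate (l.map (List.map f)) := by
  intro l
  induction l with
  | nil => simp [List.intercalate]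
  | cons x t ih =>
    cases t with
    | nil => simp [pvIntercalate_singleton]
    | cons y s =>
      rw [pvIntercalate_cons sep x (y :: s) (by simp)]
      simp only [List.map_cons]
      rw [pvIntercalate_cons (sep.map f) (x.map f)
        ((y.map f) :: s.map (List.map f)) (by simp)]
      simp only [List.map_append]
      rw [ih]
      simp [List.map_cons, List.append_assoc]

-- splitOn.go: accumulator shape, nonemptiness, join-inverse
theorem pvGo_acc (sep : List Char) :
    ∀ (fuel : Nat) (l cur : List Char) (acc : List (List Char)),
      PySem.Chars.splitOn.go sep fuel l cur acc =
        acc.reverse ++ PySem.Chars.splitOn.go sep fuel l cur [] := by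
  intro fuel
  induction fuel with
  | zero => intro l cur acc; simp [PySem.Chars.splitOn.go]
  | succ fuel ih =>
    intro l cur acc
    cases l with
    | nil => simp [PySem.Chars.splitOn.go]
    | cons c rest =>
      rw [PySem.Chars.splitOn.go, PySem.Chars.splitOn.go]
      by_cases hp : sep.isPrefixOf (c :: rest)
      · rw [if_pos hp, if_pos hp, ih _ _ (cur.reverse :: acc), ih _ _ [cur.reverse]]
        simp
      · rw [if_neg hp, if_neg hp, ih rest (c :: cur) acc]

theorem pvGo_ne_nil (sep : List Char) :
    ∀ (fuel : Nat) (l cur : List Char), PySem.Chars.splitOn.go sep fuel l cur [] ≠ [] := by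
  intro fuel
  induction fuel with
  | zero => intro l cur; simp [PySem.Chars.splitOn.go]
  | succ fuel ih =>
    intro l cur
    cases l with
    | nil => simp [PySem.Chars.splitOn.go]
    | cons c rest =>
      rw [PySem.Chars.splitOn.go]
      by_cases hp : sep.isPrefixOf (c :: rest)
      · rw [if_pos hp, pvGo_acc]
        simp
      · rw [if_neg hp]; exact ih rest (c :: cur)

theorem pvGo_join (sep : List Char) (hsep : sep ≠ []) :
    ∀ (fuel : Nat) (l cur : List Char), l.length < fuel →
      sep.intercalate (PySem.Chars.splitOn.go sep fuel l cur []) = cur.reverse ++ l := by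
  intro fuel
  induction fuel with
  | zero => intro l cur h; omega
  | succ fuel ih =>
    intro l cur h
    cases l with
    | nil => simp [PySem.Chars.splitOn.go, pvIntercalate_singleton]
    | cons c rest =>
      rw [PySem.Chars.splitOn.go]
      by_cases hp : sep.isPrefixOf (c :: rest)
      · rw [if_pos hp, pvGo_acc]
        have hpre : sep <+: (c :: rest) := List.isPrefixOf_iff_prefix.mp hp
        obtain ⟨t, ht⟩ := hpre
        have hslen : 1 ≤ sep.length := by
          cases sep with
          | nil => exact absurd rfl hsep
          | cons _ _ => simp
        have hdrop : (c :: rest).drop sep.length = t := by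
          rw [← ht, List.drop_left]
        have hlen : ((c :: rest).drop sep.length).length < fuel := by
          rw [hdrop]
          have := congrArg List.length ht
          simp at this h
          omega
        rw [show (List.reverse [cur.reverse] : List (List Char)) = [cur.reverse] from rfl]
        rw [show ([cur.reverse] ++ PySem.Chars.splitOn.go sep fuel ((c :: rest).drop sep.length) [] []) =
          cur.reverse :: PySem.Chars.splitOn.go sep fuel ((c :: rest).drop sep.length) [] [] from rfl]
        rw [pvIntercalate_cons _ _ _ (pvGo_ne_nil sep fuel _ []), ih _ _ hlen]
        rw [hdrop, ← ht]
        simp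
      · rw [if_neg hp, ih rest (c :: cur) (by simp at h ⊢; omega)]
        simp

theorem pvJoin_splitOn (sep : List Char) (hsep : sep ≠ []) (cs : List Char) :
    PySem.Chars.join sep (PySem.Chars.splitOn cs sep) = cs := by
  unfold PySem.Chars.join PySem.Chars.splitOn
  simpa using pvGo_join sep hsep (cs.length + 1) cs [] (by omega)

-- lower-equality machinery
theorem pvLower_cap (u : List Char) :
    (pvCap u).map PySem.Chars.lowerChar = u.map PySem.Chars.lowerChar := by
  cases u with
  | nil => rfl
  | cons c t =>
    simp only [pvCap, List.map_cons, pvLowerChar_upperChar, PySem.Chars.lower, List.map_map]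
    congr 1
    simp [Function.comp_def, pvLowerChar_idem]

theorem pvCap_congr {u v : List Char}
    (h : u.map PySem.Chars.lowerChar = v.map PySem.Chars.lowerChar) : pvCap u = pvCap v := by
  cases u with
  | nil => cases v with
    | nil => rfl
    | cons d s => simp at h
  | cons c t =>
    cases v with
    | nil => simp at h
    | cons d s =>
      simp only [List.map_cons, List.cons.injEq] at h
      simp only [pvCap, PySem.Chars.lower, List.cons.injEq]
      exact ⟨pvUpperChar_congr h.1, h.2⟩

def pvLL (u v : List Char) : Prop := u.map PySem.Chars.lowerChar = v.map PySem.Chars.lowerChar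

theorem pvMap_cap_congr {ps qs : List (List Char)} (h : List.Forall₂ pvLL ps qs) :
    ps.map pvCap = qs.map pvCap := by
  induction h with
  | nil => rfl
  | cons h1 _ ih => simp only [List.map_cons]; rw [ih, pvCap_congr h1]

theorem pvGo_congr :
    ∀ (fuel : Nat) (la lb cura curb : List Char) (acca accb : List (List Char)),
      pvLL la lb → pvLL cura curb → List.Forall₂ pvLL acca accb →
      List.Forall₂ pvLL (PySem.Chars.splitOn.go ['\n'] fuel la cura acca)
        (PySem.Chars.splitOn.go ['\n'] fuel lb curb accb) := by
  intro fuel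
  induction fuel with
  | zero =>
    intro la lb cura curb acca accb hl hc ha
    simp only [PySem.Chars.splitOn.go]
    exact List.forall₂_reverse_iff.mpr (List.Forall₂.cons
      (by simp only [pvLL, List.map_append, List.map_reverse] at hl hc ⊢; rw [hl, hc]) ha)
  | succ fuel ih =>
    intro la lb cura curb acca accb hl hc ha
    cases la with
    | nil =>
      cases lb with
      | nil =>
        simp only [PySem.Chars.splitOn.go]
        exact List.forall₂_reverse_iff.mpr (List.Forall₂.cons
          (by simp only [pvLL, List.map_reverse] at hc ⊢; rw [hc]) ha)
      | cons d s => simp [pvLL] at hl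
    | cons c rest =>
      cases lb with
      | nil => simp [pvLL] at hl
      | cons d s =>
        simp only [pvLL, List.map_cons, List.cons.injEq] at hl
        rw [PySem.Chars.splitOn.go, PySem.Chars.splitOn.go]
        have hpr : ∀ (x : Char) (xs : List Char),
            (['\n'].isPrefixOf (x :: xs)) = ('\n' == x) := by
          intro x xs; simp [List.isPrefixOf]
        by_cases hcn : c = '\n'
        · have hdn : d = '\n' := pvLowerChar_newline (by rw [← hl.1, hcn]; rfl)
          rw [if_pos (by rw [hpr]; exact beq_iff_eq.mpr hcn.symm),
            if_pos (by rw [hpr]; exact beq_iff_eq.mpr hdn.symm)]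
          exact ih _ _ [] [] _ _ hl.2 rfl
            (List.Forall₂.cons
              (by simp only [pvLL, List.map_reverse] at hc ⊢; rw [hc]) ha)
        · have hdn : d ≠ '\n' := fun hd =>
            hcn (pvLowerChar_newline (by rw [hl.1, hd]; rfl))
          rw [if_neg (by rw [hpr]; simp [beq_iff_eq]; exact fun he => hcn he.symm),
            if_neg (by rw [hpr]; simp [beq_iff_eq]; exact fun he => hdn he.symm)]
          exact ih _ _ (c :: cura) (d :: curb) _ _ hl.2
            (by unfold pvLL at hc ⊢; simp only [List.map_cons, hl.1, hc]) ha

theorem pvSplitOn_nl_congr {a b : List Char} (h : pvLL a b) :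
    List.Forall₂ pvLL (PySem.Chars.splitOn a ['\n']) (PySem.Chars.splitOn b ['\n']) := by
  unfold PySem.Chars.splitOn
  have hlen : a.length = b.length := by
    have := congrArg List.length h
    simpa using this
  rw [← hlen]
  exact pvGo_congr (a.length + 1) a b [] [] [] [] h rfl List.Forall₂.nil

-- the sentence pass preserves lower-equality with the original text
theorem pvLower_pass1 (cs : List Char) :
    pvLL (PySem.Chars.join ['.', ' ']
      ((PySem.Chars.splitOn cs ['.', ' ']).map pvCap)) cs := by
  unfold pvLL
  have h1 : PySem.Chars.join ['.', ' '] = List.intercalate ['.', ' '] := rfl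
  rw [h1, pvMap_intercalate, List.map_map]
  have h3 : ((PySem.Chars.splitOn cs ['.', ' ']).map (List.map PySem.Chars.lowerChar ∘ pvCap)) =
      ((PySem.Chars.splitOn cs ['.', ' ']).map (List.map PySem.Chars.lowerChar)) := by
    apply List.map_congr_left
    intro u _
    exact pvLower_cap u
  rw [h3, ← pvMap_intercalate]
  have h4 : List.intercalate ['.', ' '] (PySem.Chars.splitOn cs ['.', ' ']) = cs :=
    pvJoin_splitOn ['.', ' '] (by simp) cs
  rw [h4]

theorem pvMain (cs : List Char) :
    PySem.Chars.join ['\n'] ((PySem.Chars.splitOn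
        (PySem.Chars.join ['.', ' '] ((PySem.Chars.splitOn cs ['.', ' ']).map pvCap))
        ['\n']).map pvCap) =
    PySem.Chars.join ['\n'] ((PySem.Chars.splitOn cs ['\n']).map pvCap) := by
  exact congrArg _ (pvMap_cap_congr (pvSplitOn_nl_congr (pvLower_pass1 cs)))

-- ===== VERDICT (by name: the statement is the Claim_ definition above) =====
theorem denormalize_spec : Claim_equal_denormalize := by
  intro text _
  unfold Spec_denormalize denormalize denormalize_alt
  by_cases h : text.toList = []
  · rw [if_pos h, h]
    rfl
  · rw [if_neg h]
    exact congrArg String.mk (pvMain text.toList)
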